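-- pv_equiv track=rewrite | github.com/bearmishka/syreto | 03_analysis/reviewer_workload_balancer.py | canonicalize_summary_text
-- ===== SOURCE A (Python) =====
-- def canonicalize_summary_text(text: str) -> str:
--     stripped = text.strip("\n")
--     if not stripped:
--         return ""
--
--     lines = stripped.splitlines()
--     while len(lines) >= 2 and len(lines) % 2 == 0:
--         half = len(lines) // 2
--         if lines[:half] != lines[half:]:
--             break
--         lines = lines[:half]
--
--     return "\n".join(lines) + "\n"
-- ===== SOURCE B (Python) =====
-- def canonicalize_summary_text(text: str) -> str:
--     stripped = text.strip("\n")
--     if not stripped: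
--         return ""
--
--     lines = stripped.splitlines()
--     # m = 2-adic valuation of len(lines); then find the largest k <= m whose
--     # base block repeats 2**k times (k = 0 always matches).
--     n = len(lines)
--     m = 0
--     while n % 2 == 0 and n != 0:
--         n //= 2
--         m += 1
--     for k in range(m, -1, -1):
--         base = lines[: len(lines) // (2 ** k)]
--         if base * (2 ** k) == lines:
--             lines = base
--             break
--
--     return "\n".join(lines) + "\n"
-- ===== Notes on version B (the rewrite author's own statement) =====
-- stated objective: alternative
-- what changed: The iterative halve-while-halves-match loop is replaced by computing the 2-adic valuation m of the line count and searching k = m..0 for the largest power-of-two repetition factor whose base block, repeated 2^k times, rebuilds the lines; that base is joined.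
import Mathlib
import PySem

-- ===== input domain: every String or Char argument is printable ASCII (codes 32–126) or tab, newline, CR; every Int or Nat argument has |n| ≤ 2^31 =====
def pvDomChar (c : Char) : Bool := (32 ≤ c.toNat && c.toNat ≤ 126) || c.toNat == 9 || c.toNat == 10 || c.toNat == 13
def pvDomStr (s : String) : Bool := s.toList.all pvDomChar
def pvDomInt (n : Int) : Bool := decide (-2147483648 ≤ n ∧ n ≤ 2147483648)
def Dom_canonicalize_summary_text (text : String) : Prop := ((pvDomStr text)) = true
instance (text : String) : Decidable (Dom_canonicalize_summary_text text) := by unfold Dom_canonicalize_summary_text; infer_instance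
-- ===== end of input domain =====

-- B replaces A's repeated-halving while loop by a direct search for the maximal
-- power-of-two repetition factor of the line list (objective: alternative).

-- ===== PORT A =====
-- A's while loop: halve the line list while the two halves are equal.
-- lines[:half] / lines[half:] with 0 ≤ half ≤ len(lines) are exactly take/drop.
def pvLoopA (lines : List String) : List String :=
  if 2 ≤ lines.length ∧ lines.length % 2 = 0 then
    let half := lines.length / 2
    if lines.take half ≠ lines.drop half then lines
    else pvLoopA (lines.take half)
  else lines
termination_by lines.length
decreasing_by
  simp only [List.length_take]
  omega

def canonicalize_summary_text (text : String) : String :=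
  let stripped := PySem.Str.stripChars text "\n"
  if stripped = "" then ""
  else
    let lines := pvLoopA (PySem.Str.splitlines stripped)
    PySem.Str.join "\n" lines ++ "\n"

-- ===== PORT B =====
-- m = 2-adic valuation of n (the `n ≠ 0` guard only makes the recursion total;
-- B is only ever called with n ≥ 1, where it matches Python's `while` exactly).
def pvV2 (n : Nat) : Nat :=
  if n % 2 = 0 ∧ n ≠ 0 then pvV2 (n / 2) + 1 else 0

-- `for k in range(m, -1, -1): if base * 2**k == lines: lines = base; break`
-- (the k = 0 check always succeeds, so the fall-through result is `lines`).
def pvSearchB (lines : List String) : Nat → List String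
  | 0 =>
    let base := lines.take (lines.length / 2 ^ 0)
    if (List.replicate (2 ^ 0) base).flatten = lines then base else lines
  | k + 1 =>
    let base := lines.take (lines.length / 2 ^ (k + 1))
    if (List.replicate (2 ^ (k + 1)) base).flatten = lines then base
    else pvSearchB lines k

def canonicalize_summary_text_alt (text : String) : String :=
  let stripped := PySem.Str.stripChars text "\n"
  if stripped = "" then ""
  else
    let lines := PySem.Str.splitlines stripped
    let lines := pvSearchB lines (pvV2 lines.length)
    PySem.Str.join "\n" lines ++ "\n"

-- ===== PRECONDITION & SPEC =====
def Spec_canonicalize_summary_text (text : String) (out : String) : Prop := out = canonicalize_summary_text_alt text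
instance (text : String) (out : String) : Decidable (Spec_canonicalize_summary_text text out) := by unfold Spec_canonicalize_summary_text; infer_instance

-- ===== CLAIM (what is proved, stated in full; the proofs are below) =====
def Claim_equal_canonicalize_summary_text : Prop := ∀ (text : String), Dom_canonicalize_summary_text text → Spec_canonicalize_summary_text text (canonicalize_summary_text text)

-- ===== LEMMAS AND PROOFS =====

-- a list of the form X ++ X has equal halves
lemma halves_of_double {X L : List String} (h : L = X ++ X) :
    L.take (L.length / 2) = L.drop (L.length / 2) := by
  subst h
  have hlen : (X ++ X).length / 2 = X.length := by
    simp [List.length_append]; omega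
  rw [hlen, List.take_left, List.drop_left]

lemma flatten_replicate_double (m : Nat) (b : List String) :
    (List.replicate (2 ^ (m + 1)) b).flatten
      = (List.replicate (2 ^ m) b).flatten ++ (List.replicate (2 ^ m) b).flatten := by
  have : 2 ^ (m + 1) = 2 ^ m + 2 ^ m := by ring
  rw [this, List.replicate_add, List.flatten_append]

-- if its halves differ, the downward search never fires and returns `lines`
lemma searchB_of_ne (lines : List String)
    (h : lines.take (lines.length / 2) ≠ lines.drop (lines.length / 2)) :
    ∀ k, pvSearchB lines k = lines := by
  intro k
  induction k with
  | zero => simp [pvSearchB]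
  | succ j ih =>
    rw [pvSearchB]
    split
    · rename_i hrep
      exact absurd (halves_of_double (X := (List.replicate (2 ^ j) _).flatten)
        (by rw [← flatten_replicate_double, hrep])) h
    · exact ih

-- key doubling lemma: searching a doubled list one level deeper is searching the half
lemma searchB_double (H : List String) :
    ∀ k, pvSearchB (H ++ H) (k + 1) = pvSearchB H k := by
  have hlen : ∀ k, (H ++ H).length / 2 ^ (k + 1) = H.length / 2 ^ k := by
    intro k
    have : (H ++ H).length = 2 * H.length := by simp [List.length_append]; omega
    rw [this, pow_succ, mul_comm (2 ^ k) 2, ← Nat.div_div_eq_div_mul,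
      Nat.mul_div_cancel_left _ (by norm_num)]
  have hbase : ∀ k, (H ++ H).take ((H ++ H).length / 2 ^ (k + 1))
      = H.take (H.length / 2 ^ k) := by
    intro k
    rw [hlen k]
    exact List.take_append_of_le_length (Nat.div_le_self _ _)
  have hchk : ∀ k, ((List.replicate (2 ^ (k + 1)) (H.take (H.length / 2 ^ k))).flatten = H ++ H)
      ↔ ((List.replicate (2 ^ k) (H.take (H.length / 2 ^ k))).flatten = H) := by
    intro k
    set X := (List.replicate (2 ^ k) (H.take (H.length / 2 ^ k))).flatten with hX
    rw [flatten_replicate_double, ← hX]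
    constructor
    · intro hxx
      have hl : X.length = H.length := by
        have := congrArg List.length hxx
        simp only [List.length_append] at this
        omega
      exact (List.append_inj hxx hl).1
    · intro hx; rw [hx]
  intro k
  induction k with
  | zero =>
    have hb0 : H.take (H.length / 2 ^ 0) = H := by simp
    conv_lhs => rw [pvSearchB]
    conv_rhs => rw [pvSearchB]
    simp only [hbase 0, hb0]
    rw [if_pos (by rw [flatten_replicate_double]; simp :
        (List.replicate (2 ^ (0 + 1)) H).flatten = H ++ H),
      if_pos (by simp : (List.replicate (2 ^ 0) H).flatten = H)]
  | succ j ih =>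
    conv_lhs => rw [pvSearchB]
    conv_rhs => rw [pvSearchB]
    simp only [hbase (j + 1)]
    by_cases hrep :
        (List.replicate (2 ^ (j + 1)) (H.take (H.length / 2 ^ (j + 1)))).flatten = H
    · rw [if_pos ((hchk (j + 1)).mpr hrep), if_pos hrep]
    · rw [if_neg (fun hc => hrep ((hchk (j + 1)).mp hc)), if_neg hrep]
      exact ih

lemma v2_even {n : Nat} (h2 : n % 2 = 0) (h0 : n ≠ 0) : pvV2 n = pvV2 (n / 2) + 1 := by
  rw [pvV2]; simp [h2, h0]

lemma v2_odd {n : Nat} (h2 : n % 2 ≠ 0) : pvV2 n = 0 := by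
  rw [pvV2]; simp [h2]

-- main invariant: the downward search at the 2-adic valuation equals A's halving loop
lemma searchB_eq_loopA (lines : List String) :
    pvSearchB lines (pvV2 lines.length) = pvLoopA lines := by
  generalize hn : lines.length = n
  induction n using Nat.strong_induction_on generalizing lines with
  | _ n ih =>
  subst hn
  rw [pvLoopA]
  by_cases hc : 2 ≤ lines.length ∧ lines.length % 2 = 0
  · rw [if_pos hc]
    by_cases hne : lines.take (lines.length / 2) ≠ lines.drop (lines.length / 2)
    · rw [if_pos hne]
      exact searchB_of_ne lines hne _
    · rw [if_neg hne]
      rw [ne_eq, not_not] at hne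
      set H := lines.take (lines.length / 2) with hH
      have hsplit : lines = H ++ H := by
        conv_lhs => rw [← List.take_append_drop (lines.length / 2) lines]
        rw [← hne]
      have hHlen : H.length = lines.length / 2 := by
        rw [hH, List.length_take]; omega
      have hv : pvV2 lines.length = pvV2 H.length + 1 := by
        rw [hHlen]; exact v2_even hc.2 (by omega)
      rw [hv, hsplit, searchB_double H (pvV2 H.length)]
      exact ih H.length (by omega) H rfl
  · rw [if_neg hc]
    have : lines.length % 2 ≠ 0 ∨ lines.length = 0 := by omega
    rcases this with h | h
    · rw [v2_odd h]; simp [pvSearchB]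
    · have : lines = [] := List.length_eq_zero_iff.mp h
      subst this
      simp [pvV2, pvSearchB]

-- ===== VERDICT (by name: the statement is the Claim_ definition above) =====
theorem canonicalize_summary_text_spec : Claim_equal_canonicalize_summary_text := by
  intro text _
  unfold Spec_canonicalize_summary_text canonicalize_summary_text canonicalize_summary_text_alt
  simp only [searchB_eq_loopA]
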